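-- pv_equiv track=rewrite | github.com/codefuse-ai/codefuse-evaluation | codefuseEval_202503/evaluation.py | extract_code_before_main
-- ===== SOURCE A (Python) =====
-- def extract_code_before_main(code_str):
--     lines = code_str.split('\n')
--     main_index = -1
--     for i in range(len(lines)):
--         if "main()" in lines[i]:
--             main_index = i
--             break
--     if main_index == -1:
--         return code_str
--     else:
--         return '\n'.join(lines[:main_index])
-- ===== SOURCE B (Python) =====
-- def extract_code_before_main(code_str):
--     idx = code_str.find("main()")
--     if idx == -1:
--         return code_str
--     r = code_str.rfind("\n", 0, idx)
--     return "" if r == -1 else code_str[:r]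
-- ===== Notes on version B (the rewrite author's own statement) =====
-- stated objective: alternative
-- what changed: B never builds the list of lines and has no indexed loop: it locates the marker substring in the raw string with str.find, recovers the preceding line boundary with a backward str.rfind for the newline bounded by that position, and returns the raw prefix before it (empty when the match is on the first line).
import Mathlib
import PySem

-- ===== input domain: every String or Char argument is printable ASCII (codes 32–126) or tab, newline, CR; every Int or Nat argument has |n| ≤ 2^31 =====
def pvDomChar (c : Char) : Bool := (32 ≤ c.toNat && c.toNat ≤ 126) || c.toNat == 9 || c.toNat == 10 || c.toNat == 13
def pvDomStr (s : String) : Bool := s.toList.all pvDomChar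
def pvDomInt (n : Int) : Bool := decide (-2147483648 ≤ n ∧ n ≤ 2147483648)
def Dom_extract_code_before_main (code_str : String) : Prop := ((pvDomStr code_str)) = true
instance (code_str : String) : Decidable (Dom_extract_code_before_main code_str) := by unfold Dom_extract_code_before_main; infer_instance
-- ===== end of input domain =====

-- B replaces A's split-into-lines + indexed scan by raw-string find/rfind (no line list is built); objective: alternative.

-- ===== PORT A =====
-- A's for-loop with break: first index i with "main()" in lines[i], else -1
def pvFindMainIdx (lines : List String) (i : Int) : Int :=
  match lines with
  | [] => -1
  | l :: rest => if PySem.Str.isIn "main()" l then i else pvFindMainIdx rest (i + 1)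

def extract_code_before_main (code_str : String) : String :=
  let lines := (PySem.Str.split? code_str "\n").getD []   -- sep "\n" ≠ "", so split? is some
  let main_index := pvFindMainIdx lines 0
  if main_index = -1 then code_str
  else PySem.Str.join "\n" (PySem.List.slice lines none (some main_index))

-- ===== PORT B =====
def extract_code_before_main_alt (code_str : String) : String :=
  let idx := PySem.Str.find code_str "main()"
  if idx = -1 then code_str
  else
    let r := PySem.Str.rfindFrom code_str "\n" 0 (some idx)
    if r = -1 then "" else PySem.Str.slice code_str none (some r)

-- ===== PRECONDITION & SPEC =====
def Spec_extract_code_before_main (code_str : String) (out : String) : Prop := out = extract_code_before_main_alt code_str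
instance (code_str : String) (out : String) : Decidable (Spec_extract_code_before_main code_str out) := by unfold Spec_extract_code_before_main; infer_instance

-- ===== CLAIM (what is proved, stated in full; the proofs are below) =====
def Claim_equal_extract_code_before_main : Prop := ∀ (code_str : String), Dom_extract_code_before_main code_str → Spec_extract_code_before_main code_str (extract_code_before_main code_str)

-- ===== LEMMAS AND PROOFS =====

-- reference line splitter: pvLines pre cs = lines of pre ++ cs, split on '\n'
def pvLines : List Char → List Char → List (List Char)
  | pre, [] => [pre]
  | pre, c :: t => if c = '\n' then pre :: pvLines [] t else pvLines (pre ++ [c]) t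

-- index of the last '\n' in a char list, -1 if none
def pvLastNl : List Char → Int
  | [] => -1
  | c :: t => if pvLastNl t = -1 then (if c = '\n' then (0 : Int) else -1) else 1 + pvLastNl t

-- char-level version of A's indexed loop
def pvIdxOf (sub : List Char) (lls : List (List Char)) (i : Int) : Int :=
  match lls with
  | [] => -1
  | l :: rest => if PySem.Chars.isIn sub l then i else pvIdxOf sub rest (i + 1)

theorem pvLines_ne_nil (pre cs : List Char) : pvLines pre cs ≠ [] := by
  induction cs generalizing pre with
  | nil => simp [pvLines]
  | cons c t ih => simp only [pvLines]; split <;> simp [ih]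

theorem pvLines_no_nl (l : List Char) (pre : List Char) (h : '\n' ∉ l) : pvLines pre l = [pre ++ l] := by
  induction l generalizing pre with
  | nil => simp [pvLines]
  | cons c t ih =>
    simp only [List.mem_cons, not_or] at h
    simp [pvLines, Ne.symm h.1, ih _ h.2]

theorem pvLines_split (l t : List Char) (pre : List Char) (h : '\n' ∉ l) :
    pvLines pre (l ++ '\n' :: t) = (pre ++ l) :: pvLines [] t := by
  induction l generalizing pre with
  | nil => simp [pvLines]
  | cons c r ih =>
    simp only [List.mem_cons, not_or] at h
    simp [pvLines, Ne.symm h.1, ih _ h.2]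

theorem pvLastNl_ge (u : List Char) : -1 ≤ pvLastNl u := by
  induction u with
  | nil => simp [pvLastNl]
  | cons c t ih => simp only [pvLastNl]; split <;> [split <;> omega; omega]

theorem pvLastNl_no_nl (u : List Char) (h : '\n' ∉ u) : pvLastNl u = -1 := by
  induction u with
  | nil => simp [pvLastNl]
  | cons c t ih =>
    simp only [List.mem_cons, not_or] at h
    simp [pvLastNl, ih h.2, Ne.symm h.1]

theorem pvLastNl_snoc (v : List Char) (c : Char) :
    pvLastNl (v ++ [c]) = if c = '\n' then (v.length : Int) else pvLastNl v := by
  induction v with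
  | nil => simp [pvLastNl]
  | cons d t ih =>
    have := pvLastNl_ge t
    have := pvLastNl_ge (t ++ [c])
    simp only [List.cons_append, pvLastNl, ih, List.length_cons]
    by_cases hc : c = '\n' <;> simp [hc] <;> first | omega | (split <;> first | omega | (split <;> push_cast <;> omega))

theorem pvLastNl_split (l u : List Char) (h : '\n' ∉ l) :
    pvLastNl (l ++ '\n' :: u) =
      if pvLastNl u = -1 then (l.length : Int) else (l.length : Int) + 1 + pvLastNl u := by
  induction l with
  | nil =>
    simp only [List.nil_append, pvLastNl, List.length_nil]
    by_cases hu : pvLastNl u = -1 <;> simp [hu] <;> omega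
  | cons c t ih =>
    simp only [List.mem_cons, not_or] at h
    have := pvLastNl_ge u
    simp only [List.cons_append, pvLastNl, ih h.2, List.length_cons]
    split <;> [skip; split] <;> push_cast <;> omega


theorem splitOn_go_eq' (fuel : Nat) : ∀ (l cur : List Char) (acc : List (List Char)),
    l.length < fuel →
    PySem.Chars.splitOn.go ['\n'] fuel l cur acc = acc.reverse ++ pvLines cur.reverse l := by
  induction fuel with
  | zero => intro l cur acc h; omega
  | succ fuel ih =>
    intro l cur acc h
    cases l with
    | nil =>
      rw [PySem.Chars.splitOn.go]
      all_goals simp [pvLines]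
    | cons c rest =>
      rw [PySem.Chars.splitOn.go]
      by_cases hc : c = '\n'
      · have hp : (['\n'] : List Char).isPrefixOf (c :: rest) = true := by
          simp [List.isPrefixOf, hc]
        rw [if_pos hp]
        simp only [List.length_singleton, hc, List.drop_succ_cons, List.drop_zero]
        rw [ih rest [] (cur.reverse :: acc) (by simpa using Nat.lt_of_succ_lt_succ h)]
        simp [pvLines]
      · have hp : (['\n'] : List Char).isPrefixOf (c :: rest) = false := by
          simp [List.isPrefixOf, hc]; intro hco; exact absurd hco.symm hc
        rw [if_neg (by simp [hp])]
        rw [ih rest (c :: cur) acc (by simpa using Nat.lt_of_succ_lt_succ h)]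
        simp [pvLines]
        exact fun hco => absurd hco hc

theorem splitOn_eq (cs : List Char) : PySem.Chars.splitOn cs ['\n'] = pvLines [] cs := by
  rw [PySem.Chars.splitOn, splitOn_go_eq' (cs.length + 1) cs [] [] (by omega)]
  simp


theorem rfind_go_newline (j : Nat) (u : List Char) :
    PySem.Chars.rfind.go u ['\n'] j = pvLastNl (u.take (j + 1)) := by
  induction j with
  | zero =>
    rw [PySem.Chars.rfind.go]
    cases u with
    | nil => simp [pvLastNl]
    | cons c t =>
      by_cases hc : c = '\n'
      · simp [List.isPrefixOf, hc, pvLastNl]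
      · simp [List.isPrefixOf, hc, Ne.symm hc, pvLastNl]
  | succ j ih =>
    rw [PySem.Chars.rfind.go, ih]
    by_cases hlt : j + 1 < u.length
    · have hdrop : u.drop (j+1) = u[j+1] :: u.drop (j+2) := by
        rw [List.drop_eq_getElem_cons hlt]
      have htake : u.take (j+2) = u.take (j+1) ++ [u[j+1]] := by
        rw [List.take_succ, List.getElem?_eq_getElem hlt]; rfl
      rw [htake, pvLastNl_snoc, hdrop]
      by_cases hc : u[j+1] = '\n'
      · simp [List.isPrefixOf, hc, List.length_take, Nat.min_eq_left (Nat.le_of_lt hlt)]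
      · simp [List.isPrefixOf, hc, Ne.symm hc, List.length_take, Nat.min_eq_left (Nat.le_of_lt hlt)]
    · have h1 : u.drop (j+1) = [] := List.drop_eq_nil_of_le (by omega)
      have h2 : u.take (j+2) = u.take (j+1) := by
        rw [List.take_of_length_le (by omega), List.take_of_length_le (by omega)]
      rw [h1, h2]; simp [List.isPrefixOf]

theorem rfind_newline (u : List Char) : PySem.Chars.rfind u ['\n'] = pvLastNl u := by
  rw [PySem.Chars.rfind, rfind_go_newline, List.take_of_length_le (by omega)]

theorem rfindFrom_eq_lastNl (cs : List Char) (idx : Int) (h0 : 0 ≤ idx) (hle : idx ≤ cs.length) :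
    PySem.Chars.rfindFrom cs ['\n'] 0 (some idx) = pvLastNl (cs.take idx.toNat) := by
  have hge := pvLastNl_ge (cs.take idx.toNat)
  simp only [PySem.Chars.rfindFrom]
  simp [not_lt.mpr hle, (show ¬ idx < (0:Int) by omega), rfind_newline]
  omega


theorem find_eq_of (s sub : List Char) (j : Nat) (hj : sub <+: s.drop j)
    (hmin : ∀ i < j, ¬ sub <+: s.drop i) : PySem.Chars.find s sub = j := by
  have hin : PySem.Chars.isIn sub s = true := by
    rw [← PySem.Chars.exists_prefix_drop_iff_isIn]; exact ⟨j, hj⟩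
  have hne : PySem.Chars.find s sub ≠ -1 := by
    rw [PySem.Chars.find_ne_neg_one_iff]
    rw [PySem.Chars.isIn_iff_infix] at hin; exact hin
  have h0 : 0 ≤ PySem.Chars.find s sub := by
    have := PySem.Chars.neg_one_le_find s sub; omega
  obtain ⟨hpre, hm⟩ := PySem.Chars.find_spec h0
  rcases lt_trichotomy (PySem.Chars.find s sub).toNat j with h | h | h
  · exact absurd hpre (hmin _ h)
  · omega
  · exact absurd hj (hm j h)

theorem not_prefix_clean (sub u t : List Char) (hnl : '\n' ∉ sub) (hu : ¬ sub <:+: u) :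
    ¬ sub <+: u ++ '\n' :: t := by
  intro h
  rcases Nat.lt_or_ge u.length sub.length with hlt | hle
  case _ =>
    have hlen : u.length < sub.length := hlt
    have : ('\n' :: t : List Char)[0]'(by simp) = sub[u.length]'(by omega) := by
      have := List.IsPrefix.getElem h (i := u.length) (by omega)
      simpa using this.symm
    apply hnl
    have : sub[u.length]'(by omega) = '\n' := by simpa using this.symm
    rw [← this]; exact List.getElem_mem _
  case _ =>
    exact hu (List.IsPrefix.isInfix ((List.isPrefix_append_of_length hle).mp h))
  
theorem find_append_left (sub l v : List Char) (h : PySem.Chars.find l sub ≠ -1) :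
    PySem.Chars.find (l ++ v) sub = PySem.Chars.find l sub := by
  have h0 : 0 ≤ PySem.Chars.find l sub := by
    have := PySem.Chars.neg_one_le_find l sub; omega
  obtain ⟨hpre, hm⟩ := PySem.Chars.find_spec h0
  set j := (PySem.Chars.find l sub).toNat with hjdef
  have hjle : j ≤ l.length := by
    have := PySem.Chars.find_le_length l sub; omega
  have hlen : sub.length ≤ l.length - j := by
    have := hpre.length_le; simp [List.length_drop] at this; omega
  have := find_eq_of (l ++ v) sub j
    (by rw [List.drop_append_of_le_length hjle]; exact hpre.trans (List.prefix_append _ _))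
    (by
      intro i hi hpre2
      rw [List.drop_append_of_le_length (by omega)] at hpre2
      have : sub <+: l.drop i :=
        (List.isPrefix_append_of_length (by simp [List.length_drop]; omega)).mp hpre2
      exact hm i hi this)
  omega

theorem drop_append_gt (l t : List Char) (c : Char) (m : Nat) :
    (l ++ c :: t).drop (l.length + 1 + m) = t.drop m := by
  rw [show l.length + 1 + m = l.length + (1 + m) by omega, List.drop_length_add_append,
    show 1 + m = m + 1 by omega, List.drop_succ_cons]

theorem find_append_nl (sub l t : List Char) (hnl : '\n' ∉ sub)
    (hfl : PySem.Chars.find l sub = -1) :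
    PySem.Chars.find (l ++ '\n' :: t) sub =
      if PySem.Chars.find t sub = -1 then -1
      else (l.length : Int) + 1 + PySem.Chars.find t sub := by
  have hinfl : ¬ sub <:+: l := (PySem.Chars.find_eq_neg_one_iff l sub).mp hfl
  have hnopre : ∀ i ≤ l.length, ¬ sub <+: (l ++ '\n' :: t).drop i := by
    intro i hi
    rw [List.drop_append_of_le_length hi]
    exact not_prefix_clean sub (l.drop i) t hnl
      (fun hc => hinfl (hc.trans (List.drop_suffix i l).isInfix))
  by_cases hft : PySem.Chars.find t sub = -1
  · rw [if_pos hft]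
    rw [PySem.Chars.find_eq_neg_one_iff] at hft ⊢
    intro hc
    rw [← PySem.Chars.isIn_iff_infix, ← PySem.Chars.exists_prefix_drop_iff_isIn] at hc
    obtain ⟨i, hpre⟩ := hc
    rcases Nat.lt_or_ge l.length i with hi | hi
    · apply hft
      rw [← PySem.Chars.isIn_iff_infix, ← PySem.Chars.exists_prefix_drop_iff_isIn]
      refine ⟨i - l.length - 1, ?_⟩
      rwa [show i = l.length + 1 + (i - l.length - 1) by omega, drop_append_gt] at hpre
    · exact hnopre i hi hpre
  · have h0 : 0 ≤ PySem.Chars.find t sub := by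
      have := PySem.Chars.neg_one_le_find t sub; omega
    obtain ⟨hpre, hm⟩ := PySem.Chars.find_spec h0
    set j := (PySem.Chars.find t sub).toNat with hjdef
    have heq := find_eq_of (l ++ '\n' :: t) sub (l.length + 1 + j)
      (by rw [drop_append_gt]; exact hpre)
      (by
        intro i hi hpre2
        rcases Nat.lt_or_ge l.length i with hil | hil
        · rw [show i = l.length + 1 + (i - l.length - 1) by omega, drop_append_gt] at hpre2
          exact hm (i - l.length - 1) (by omega) hpre2
        · exact hnopre i hil hpre2)
    rw [if_neg hft, heq]
    push_cast
    omega


theorem pvIdxOf_neg_or_ge (sub : List Char) (lls : List (List Char)) :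
    ∀ i : Int, 0 ≤ i → pvIdxOf sub lls i = -1 ∨ i ≤ pvIdxOf sub lls i := by
  induction lls with
  | nil => intro i _; left; rfl
  | cons l rest ih =>
    intro i hi
    by_cases hl : PySem.Chars.isIn sub l = true
    · right; simp [pvIdxOf, hl]
    · rcases ih (i + 1) (by omega) with h | h
      · left; simp [pvIdxOf, hl, h]
      · right; simp only [pvIdxOf, if_neg hl]; omega

theorem pvIdxOf_shift (sub : List Char) (lls : List (List Char)) (i : Int) (hi : 0 ≤ i) :
    pvIdxOf sub lls i =
      if pvIdxOf sub lls 0 = -1 then -1 else i + pvIdxOf sub lls 0 := by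
  induction lls generalizing i with
  | nil => simp [pvIdxOf]
  | cons l rest ih =>
    by_cases hl : PySem.Chars.isIn sub l = true
    · simp [pvIdxOf, hl]
    · simp only [pvIdxOf, if_neg hl]
      rw [ih (i + 1) (by omega)]
      rw [show (0:Int) + 1 = 1 by omega, ih 1 (by omega)]
      rcases pvIdxOf_neg_or_ge sub rest 0 le_rfl with h | h
      · simp [h]
      · by_cases h0 : pvIdxOf sub rest 0 = -1
        · simp [h0]
        · rw [if_neg h0, if_neg (by omega), if_neg h0]
          omega

theorem decomp (cs : List Char) :
    '\n' ∉ cs ∨ ∃ l t, cs = l ++ '\n' :: t ∧ '\n' ∉ l := by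
  induction cs with
  | nil => left; simp
  | cons c u ih =>
    by_cases hc : c = '\n'
    · right; exact ⟨[], u, by simp [hc], by simp⟩
    · rcases ih with h | ⟨l, t, heq, hl⟩
      · left; simp [Ne.symm hc, h]
      · right
        exact ⟨c :: l, t, by simp [heq], by simp [Ne.symm hc, hl]⟩


theorem noHit (sub : List Char) (hne : sub ≠ []) (hnl : '\n' ∉ sub) : ∀ (t : List Char),
    (pvIdxOf sub (pvLines [] t) 0 = -1 ↔ PySem.Chars.find t sub = -1) := by
  suffices H : ∀ n (t : List Char), t.length = n →
      (pvIdxOf sub (pvLines [] t) 0 = -1 ↔ PySem.Chars.find t sub = -1) by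
    intro t; exact H t.length t rfl
  intro n
  induction n using Nat.strong_induction_on with
  | _ n ih =>
    intro t hlen
    rcases decomp t with hno | ⟨l, u, heq, hlnl⟩
    · rw [pvLines_no_nl t [] hno, List.nil_append]
      by_cases hin : PySem.Chars.isIn sub t = true
      · have hf : PySem.Chars.find t sub ≠ -1 := by
          rw [PySem.Chars.isIn] at hin; simpa using hin
        simp [pvIdxOf, hin, hf]
      · have hf : PySem.Chars.find t sub = -1 := by
          rw [PySem.Chars.isIn] at hin; simpa using hin
        simp [pvIdxOf, hin, hf]
    · subst heq
      rw [pvLines_split l u [] hlnl, List.nil_append]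
      by_cases hil : PySem.Chars.isIn sub l = true
      · have hf : PySem.Chars.find l sub ≠ -1 := by
          rw [PySem.Chars.isIn] at hil; simpa using hil
        rw [find_append_left sub l _ hf]
        simp [pvIdxOf, hil, hf]
      · have hfl : PySem.Chars.find l sub = -1 := by
          rw [PySem.Chars.isIn] at hil; simpa using hil
        have hrec := ih u.length (by simp [List.length_append] at hlen; omega) u rfl
        rw [find_append_nl sub l u hnl hfl]
        have hfind_ge := PySem.Chars.neg_one_le_find u sub
        simp only [pvIdxOf, if_neg hil]
        rw [show (0:Int) + 1 = 1 by omega,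
          pvIdxOf_shift sub (pvLines [] u) 1 (by omega)]
        rcases pvIdxOf_neg_or_ge sub (pvLines [] u) 0 le_rfl with h | h
        · rw [if_pos h, if_pos (hrec.mp h)]
        · by_cases h0 : pvIdxOf sub (pvLines [] u) 0 = -1
          · rw [if_pos h0, if_pos (hrec.mp h0)]
          · have hfu : PySem.Chars.find u sub ≠ -1 := fun hc => h0 (hrec.mpr hc)
            rw [if_neg h0, if_neg hfu]
            constructor <;> intro hc <;> [omega; skip]
            exfalso
            have : (l.length : Int) ≥ 0 := by positivity
            omega

theorem take_append_gt (l t : List Char) (c : Char) (m : Nat) :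
    (l ++ c :: t).take (l.length + 1 + m) = l ++ c :: t.take m := by
  rw [List.take_append, List.take_of_length_le (by omega)]
  congr 1
  rw [show l.length + 1 + m - l.length = m + 1 by omega, List.take_succ_cons]

theorem key (sub : List Char) (hne : sub ≠ []) (hnl : '\n' ∉ sub) : ∀ (cs : List Char),
    PySem.Chars.find cs sub ≠ -1 →
    ((pvIdxOf sub (pvLines [] cs) 0 = 0 ↔ pvLastNl (cs.take (PySem.Chars.find cs sub).toNat) = -1) ∧
      PySem.Chars.join ['\n'] ((pvLines [] cs).take (pvIdxOf sub (pvLines [] cs) 0).toNat) =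
        (if pvLastNl (cs.take (PySem.Chars.find cs sub).toNat) = -1 then []
         else cs.take (pvLastNl (cs.take (PySem.Chars.find cs sub).toNat)).toNat)) := by
  suffices H : ∀ n (cs : List Char), cs.length = n → PySem.Chars.find cs sub ≠ -1 →
      ((pvIdxOf sub (pvLines [] cs) 0 = 0 ↔ pvLastNl (cs.take (PySem.Chars.find cs sub).toNat) = -1) ∧
        PySem.Chars.join ['\n'] ((pvLines [] cs).take (pvIdxOf sub (pvLines [] cs) 0).toNat) =
          (if pvLastNl (cs.take (PySem.Chars.find cs sub).toNat) = -1 then []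
           else cs.take (pvLastNl (cs.take (PySem.Chars.find cs sub).toNat)).toNat)) by
    intro cs; exact H cs.length cs rfl
  intro n
  induction n using Nat.strong_induction_on with
  | _ n ih =>
    intro cs hlen hfound
    rcases decomp cs with hno | ⟨l, u, heq, hlnl⟩
    · have hin : PySem.Chars.isIn sub cs = true := by
        rw [PySem.Chars.isIn]; simpa using hfound
      rw [pvLines_no_nl cs [] hno, List.nil_append]
      have hm : pvIdxOf sub [cs] 0 = 0 := by simp [pvIdxOf, hin]
      have hr : pvLastNl (cs.take (PySem.Chars.find cs sub).toNat) = -1 :=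
        pvLastNl_no_nl _ (fun hmem => hno (List.mem_of_mem_take hmem))
      rw [hm, hr]
      refine ⟨by simp, ?_⟩
      simp [PySem.Chars.join_nil]
    · subst heq
      rw [pvLines_split l u [] hlnl, List.nil_append]
      by_cases hil : PySem.Chars.isIn sub l = true
      · have hfLl : PySem.Chars.find l sub ≠ -1 := by
          rw [PySem.Chars.isIn] at hil; simpa using hil
        have h0 : 0 ≤ PySem.Chars.find l sub := by
          have := PySem.Chars.neg_one_le_find l sub; omega
        have hle : PySem.Chars.find l sub ≤ l.length := PySem.Chars.find_le_length l sub
        have hEq : PySem.Chars.find (l ++ '\n' :: u) sub = PySem.Chars.find l sub :=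
          find_append_left sub l _ hfLl
        have htake : (l ++ '\n' :: u).take (PySem.Chars.find (l ++ '\n' :: u) sub).toNat
            = l.take (PySem.Chars.find l sub).toNat := by
          rw [hEq, List.take_append_of_le_length (by omega)]
        have hr : pvLastNl ((l ++ '\n' :: u).take (PySem.Chars.find (l ++ '\n' :: u) sub).toNat) = -1 := by
          rw [htake]
          exact pvLastNl_no_nl _ (fun hmem => hlnl (List.mem_of_mem_take hmem))
        have hm : pvIdxOf sub (l :: pvLines [] u) 0 = 0 := by simp [pvIdxOf, hil]
        rw [hm, hr]
        refine ⟨by simp, ?_⟩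
        simp [PySem.Chars.join_nil]
      · have hfl : PySem.Chars.find l sub = -1 := by
          rw [PySem.Chars.isIn] at hil; simpa using hil
        have hfu : PySem.Chars.find u sub ≠ -1 := by
          intro hc; apply hfound
          rw [find_append_nl sub l u hnl hfl, if_pos hc]
        have hF : PySem.Chars.find (l ++ '\n' :: u) sub = ↑l.length + 1 + PySem.Chars.find u sub := by
          rw [find_append_nl sub l u hnl hfl, if_neg hfu]
        have h0u : 0 ≤ PySem.Chars.find u sub := by
          have := PySem.Chars.neg_one_le_find u sub; omega
        have htoNat : (PySem.Chars.find (l ++ '\n' :: u) sub).toNat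
            = l.length + 1 + (PySem.Chars.find u sub).toNat := by rw [hF]; omega
        have htake : (l ++ '\n' :: u).take (PySem.Chars.find (l ++ '\n' :: u) sub).toNat
            = l ++ '\n' :: u.take (PySem.Chars.find u sub).toNat := by
          rw [htoNat, take_append_gt]
        have hr'ge := pvLastNl_ge (u.take (PySem.Chars.find u sub).toNat)
        have hrsplit : pvLastNl (l ++ '\n' :: u.take (PySem.Chars.find u sub).toNat)
            = if pvLastNl (u.take (PySem.Chars.find u sub).toNat) = -1 then (l.length : Int)
              else (l.length : Int) + 1 + pvLastNl (u.take (PySem.Chars.find u sub).toNat) :=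
          pvLastNl_split _ _ hlnl
        obtain ⟨ihiff, ihjoin⟩ :=
          ih u.length (by simp [List.length_append] at hlen; omega) u rfl hfu
        have hm'ne : pvIdxOf sub (pvLines [] u) 0 ≠ -1 :=
          fun hc => hfu ((noHit sub hne hnl u).mp hc)
        have hm'ge : 0 ≤ pvIdxOf sub (pvLines [] u) 0 := by
          rcases pvIdxOf_neg_or_ge sub (pvLines [] u) 0 le_rfl with h | h
          · exact absurd h hm'ne
          · omega
        have hm : pvIdxOf sub (l :: pvLines [] u) 0 = 1 + pvIdxOf sub (pvLines [] u) 0 := by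
          simp only [pvIdxOf, if_neg hil]
          rw [show (0:Int) + 1 = 1 by omega,
            pvIdxOf_shift sub (pvLines [] u) 1 (by omega), if_neg hm'ne]
        rw [hm, htake, hrsplit]
        have hlen0 : (0:Int) ≤ (l.length : Int) := by positivity
        have hrne : (if pvLastNl (u.take (PySem.Chars.find u sub).toNat) = -1 then (l.length : Int)
              else (l.length : Int) + 1 + pvLastNl (u.take (PySem.Chars.find u sub).toNat)) ≠ -1 := by
          split <;> omega
        refine ⟨by constructor <;> intro hc <;> [omega; exact absurd hc hrne], ?_⟩
        rw [if_neg hrne]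
        have h1m : (1 + pvIdxOf sub (pvLines [] u) 0).toNat = (pvIdxOf sub (pvLines [] u) 0).toNat + 1 := by omega
        rw [h1m, List.take_succ_cons]
        by_cases hr1 : pvLastNl (u.take (PySem.Chars.find u sub).toNat) = -1
        · have hm'0 : pvIdxOf sub (pvLines [] u) 0 = 0 := ihiff.mpr hr1
          rw [if_pos hr1, hm'0]
          simp only [Int.toNat_zero, List.take_zero, PySem.Chars.join_singleton,
            Int.toNat_natCast, List.take_left]
        · have hm'0 : pvIdxOf sub (pvLines [] u) 0 ≠ 0 := fun hc => hr1 (ihiff.mp hc)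
          rw [if_neg hr1] at ihjoin ⊢
          have hm'pos : 1 ≤ (pvIdxOf sub (pvLines [] u) 0).toNat := by omega
          set k := (pvIdxOf sub (pvLines [] u) 0).toNat with hk
          set r' := pvLastNl (u.take (PySem.Chars.find u sub).toNat) with hr'
          cases hLu : pvLines [] u with
          | nil => exact absurd hLu (pvLines_ne_nil [] u)
          | cons q rest =>
            rw [hLu] at ihjoin
            rw [show k = (k - 1) + 1 by omega, List.take_succ_cons] at ihjoin ⊢
            rw [PySem.Chars.join_cons_cons, ihjoin]
            rw [show ((l.length : Int) + 1 + r').toNat = l.length + 1 + r'.toNat by omega,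
              take_append_gt]
            simp

theorem pvFindMainIdx_eq (lls : List (List Char)) (i : Int) :
    pvFindMainIdx (lls.map String.ofList) i = pvIdxOf "main()".toList lls i := by
  induction lls generalizing i with
  | nil => rfl
  | cons l rest ih =>
    simp only [List.map_cons, pvFindMainIdx, pvIdxOf, PySem.Str.isIn, String.toList_ofList, ih]

-- ===== VERDICT (by name: the statement is the Claim_ definition above) =====
theorem extract_code_before_main_spec : Claim_equal_extract_code_before_main := by
  intro code_str _
  unfold Spec_extract_code_before_main
  have hne : ("main()".toList : List Char) ≠ [] := by decide
  have hnl : '\n' ∉ "main()".toList := by decide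
  have hlines : (PySem.Str.split? code_str "\n").getD []
      = (pvLines [] code_str.toList).map String.ofList := by
    rw [PySem.Str.split?, PySem.Chars.split?,
      show ("\n".toList : List Char) = ['\n'] from rfl]
    simp [splitOn_eq]
  have hidx : PySem.Str.find code_str "main()"
      = PySem.Chars.find code_str.toList "main()".toList := rfl
  simp only [extract_code_before_main, extract_code_before_main_alt]
  rw [hlines, pvFindMainIdx_eq, hidx]
  by_cases hm : pvIdxOf "main()".toList (pvLines [] code_str.toList) 0 = -1
  · have hf : PySem.Chars.find code_str.toList "main()".toList = -1 :=
      (noHit _ hne hnl code_str.toList).mp hm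
    rw [if_pos hm, if_pos hf]
  · have hf : PySem.Chars.find code_str.toList "main()".toList ≠ -1 :=
      fun hc => hm ((noHit _ hne hnl code_str.toList).mpr hc)
    rw [if_neg hm, if_neg hf]
    have hmge : 0 ≤ pvIdxOf "main()".toList (pvLines [] code_str.toList) 0 := by
      rcases pvIdxOf_neg_or_ge "main()".toList (pvLines [] code_str.toList) 0 le_rfl with h | h
      · exact absurd h hm
      · omega
    have h0 : 0 ≤ PySem.Chars.find code_str.toList "main()".toList := by
      have := PySem.Chars.neg_one_le_find code_str.toList "main()".toList; omega
    have hlelen : PySem.Chars.find code_str.toList "main()".toList ≤ code_str.toList.length :=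
      PySem.Chars.find_le_length _ _
    have hrf : PySem.Str.rfindFrom code_str "\n" 0
        (some (PySem.Chars.find code_str.toList "main()".toList))
        = pvLastNl (code_str.toList.take
            (PySem.Chars.find code_str.toList "main()".toList).toNat) := by
      rw [PySem.Str.rfindFrom, show ("\n".toList : List Char) = ['\n'] from rfl]
      exact rfindFrom_eq_lastNl _ _ h0 hlelen
    rw [hrf, PySem.List.slice_to _ hmge]
    obtain ⟨hiff, hjoin⟩ := key "main()".toList hne hnl code_str.toList hf
    by_cases hr : pvLastNl (code_str.toList.take
        (PySem.Chars.find code_str.toList "main()".toList).toNat) = -1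
    · rw [if_pos hr, hiff.mpr hr]
      simp [PySem.Str.join, PySem.Chars.join_nil]
    · rw [if_neg hr]
      have hrge : 0 ≤ pvLastNl (code_str.toList.take
          (PySem.Chars.find code_str.toList "main()".toList).toNat) := by
        have := pvLastNl_ge (code_str.toList.take
          (PySem.Chars.find code_str.toList "main()".toList).toNat)
        omega
      have hA : (PySem.Str.join "\n"
          (List.take (pvIdxOf "main()".toList (pvLines [] code_str.toList) 0).toNat
            ((pvLines [] code_str.toList).map String.ofList))).toList
          = code_str.toList.take (pvLastNl (code_str.toList.take
              (PySem.Chars.find code_str.toList "main()".toList).toNat)).toNat := by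
        rw [PySem.Str.toList_join, ← List.map_take, List.map_map,
          show String.toList ∘ String.ofList = id from funext (fun _ => String.toList_ofList),
          List.map_id, show ("\n".toList : List Char) = ['\n'] from rfl, hjoin, if_neg hr]
      have hB : (PySem.Str.slice code_str none
          (some (pvLastNl (code_str.toList.take
            (PySem.Chars.find code_str.toList "main()".toList).toNat)))).toList
          = code_str.toList.take (pvLastNl (code_str.toList.take
              (PySem.Chars.find code_str.toList "main()".toList).toNat)).toNat := by
        rw [PySem.Str.slice, String.toList_ofList, PySem.Chars.slice_eq_listSlice,
          PySem.List.slice_to _ hrge]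
      rw [← String.ofList_toList (s := PySem.Str.join _ _), hA, ← hB, String.ofList_toList]
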